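-- pv_equiv track=rewrite | github.com/A-Ulkryxx/CS320 | Lab 4 Longest Torus/Attempt2.py | next_neighbor
-- ===== SOURCE A (Python) =====
-- def visited(trail, tup):
--     return (tup in trail)
--
-- def next_neighbor(torus, trail, neighbors, current):
--     possible_elems = []
--     possible_neighbors = []
--     for neighbor in neighbors:
--         row, column = neighbor
--         next_value = torus[row][column]
--         if ((not visited(trail, neighbor)) and (next_value > current)):
--             possible_elems.append(next_value)
--             possible_neighbors.append(neighbor)
--     if possible_elems == []:
--         return None
--     next_elem = min(possible_elems)
--     temp_ind = possible_elems.index(next_elem)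
--     next_indices = possible_neighbors[temp_ind]
--     return next_indices
-- ===== SOURCE B (Python) =====
-- def next_neighbor(torus, trail, neighbors, current):
--     best_value = None
--     best_neighbor = None
--     for neighbor in neighbors:
--         row, column = neighbor
--         next_value = torus[row][column]
--         if (neighbor not in trail and next_value > current
--                 and (best_value is None or next_value < best_value)):
--             best_value = next_value
--             best_neighbor = neighbor
--     return best_neighbor
-- ===== Notes on version B (the rewrite author's own statement) =====
-- stated objective: simpler
-- what changed: A collects two parallel lists of candidate values and neighbors and then runs min plus list.index plus a positional lookup; B keeps a running first-minimum (best_value/best_neighbor) in one pass with a strict < so ties keep the first candidate, and never materializes the candidate lists.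
import Mathlib
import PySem

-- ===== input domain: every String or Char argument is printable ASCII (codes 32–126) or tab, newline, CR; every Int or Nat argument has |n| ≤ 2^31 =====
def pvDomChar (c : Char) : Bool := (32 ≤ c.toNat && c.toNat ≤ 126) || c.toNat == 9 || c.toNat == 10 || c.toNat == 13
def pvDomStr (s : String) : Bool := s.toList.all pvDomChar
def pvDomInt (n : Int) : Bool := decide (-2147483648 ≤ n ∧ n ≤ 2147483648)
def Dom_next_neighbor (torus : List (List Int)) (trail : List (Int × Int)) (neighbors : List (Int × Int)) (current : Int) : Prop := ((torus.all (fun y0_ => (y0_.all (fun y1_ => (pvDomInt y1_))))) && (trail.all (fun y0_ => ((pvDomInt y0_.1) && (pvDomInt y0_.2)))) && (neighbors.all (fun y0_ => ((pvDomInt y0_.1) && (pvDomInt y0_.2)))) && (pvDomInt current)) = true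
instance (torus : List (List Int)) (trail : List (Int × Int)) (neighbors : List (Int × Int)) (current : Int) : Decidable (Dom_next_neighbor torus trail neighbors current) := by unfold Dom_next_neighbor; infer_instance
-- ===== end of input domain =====

-- B replaces A's collect-two-lists-then-min/index/lookup with a single-pass running first-minimum; objective: simpler.


-- ===== PORT A =====
-- visited(trail, tup) = (tup in trail)
def visited (trail : List (Int × Int)) (tup : Int × Int) : Bool := trail.contains tup

-- the body of A's for-loop
def stepA (torus : List (List Int)) (trail : List (Int × Int)) (current : Int)
    (acc : List Int × List (Int × Int)) (neighbor : Int × Int) : List Int × List (Int × Int) :=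
  let next_value := PySem.List.pyGetD (PySem.List.pyGetD torus neighbor.1 []) neighbor.2 0
  if !visited trail neighbor && decide (next_value > current) then
    (acc.1 ++ [next_value], acc.2 ++ [neighbor])
  else acc

-- A: the loop collects possible_elems / possible_neighbors in parallel; then min, index, positional lookup.
-- torus[row][column] is ported as pyGetD (total under Pre_, which excludes the IndexError inputs).
def next_neighbor (torus : List (List Int)) (trail : List (Int × Int)) (neighbors : List (Int × Int)) (current : Int) : Option (Int × Int) :=
  let st := neighbors.foldl (stepA torus trail current) ([], [])
  if st.1 = [] then none
  else
    let next_elem := (PySem.List.min? st.1 (fun x => x)).getD 0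
    let temp_ind := (PySem.List.index? st.1 next_elem).getD 0
    some (PySem.List.pyGetD st.2 (temp_ind : Int) (0, 0))

-- ===== PORT B =====
-- the body of B's for-loop: best_value/best_neighbor are always set together, held as one Option of a pair
def stepB (torus : List (List Int)) (trail : List (Int × Int)) (current : Int)
    (best : Option (Int × (Int × Int))) (neighbor : Int × Int) : Option (Int × (Int × Int)) :=
  let next_value := PySem.List.pyGetD (PySem.List.pyGetD torus neighbor.1 []) neighbor.2 0
  if !trail.contains neighbor && decide (next_value > current) &&
      (match best with | none => true | some q => decide (next_value < q.1)) then
    some (next_value, neighbor)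
  else best

-- B: one pass keeping the running first-minimum candidate; strict < keeps the first on ties.
def next_neighbor_alt (torus : List (List Int)) (trail : List (Int × Int)) (neighbors : List (Int × Int)) (current : Int) : Option (Int × Int) :=
  (neighbors.foldl (stepB torus trail current) none).map (fun q => q.2)

-- ===== PRECONDITION & SPEC =====
-- Pre_ excludes exactly the inputs where torus[row][column] raises IndexError for some listed neighbor.
def Pre_next_neighbor (torus : List (List Int)) (trail : List (Int × Int)) (neighbors : List (Int × Int)) (current : Int) : Prop :=
  neighbors.all (fun p => ((PySem.List.pyGet? torus p.1).bind (fun row => PySem.List.pyGet? row p.2)).isSome) = true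
instance (torus : List (List Int)) (trail : List (Int × Int)) (neighbors : List (Int × Int)) (current : Int) : Decidable (Pre_next_neighbor torus trail neighbors current) := by unfold Pre_next_neighbor; infer_instance

def pvWitness_next_neighbor : List (List Int) × (List (Int × Int)) × (List (Int × Int)) × Int :=
  ([[1, 2], [3, 4]], [(0, 1)], [(0, 1), (1, 0), (-1, -1)], 0)

def Spec_next_neighbor (torus : List (List Int)) (trail : List (Int × Int)) (neighbors : List (Int × Int)) (current : Int) (out : Option (Int × Int)) : Prop := out = next_neighbor_alt torus trail neighbors current
instance (torus : List (List Int)) (trail : List (Int × Int)) (neighbors : List (Int × Int)) (current : Int) (out : Option (Int × Int)) : Decidable (Spec_next_neighbor torus trail neighbors current out) := by unfold Spec_next_neighbor; infer_instance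

-- ===== CLAIM (what is proved, stated in full; the proofs are below) =====
def Claim_equal_next_neighbor : Prop := ∀ (torus : List (List Int)) (trail : List (Int × Int)) (neighbors : List (Int × Int)) (current : Int), Dom_next_neighbor torus trail neighbors current → Pre_next_neighbor torus trail neighbors current → Spec_next_neighbor torus trail neighbors current (next_neighbor torus trail neighbors current)

-- ===== LEMMAS AND PROOFS =====

-- first minimum (head wins ties) of a list of (value, payload) pairs, recursively
def selV : List (Int × (Int × Int)) → Option (Int × (Int × Int))
  | [] => none
  | p :: ps => match selV ps with
    | none => some p
    | some r => if r.1 < p.1 then some r else some p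

theorem selV_eq_none_iff (ps : List (Int × (Int × Int))) : selV ps = none ↔ ps = [] := by
  cases ps with
  | nil => simp [selV]
  | cons p ps =>
    simp only [selV]
    cases selV ps
    · simp
    · simp only []
      split <;> simp

theorem foldl_min_min (l : List Int) (a b : Int) :
    l.foldl min (min a b) = min a (l.foldl min b) := by
  induction l generalizing b with
  | nil => rfl
  | cons c t ih => simp only [List.foldl_cons, min_assoc, ih]

-- selV picks the min value, its first index, and the payload at that index
theorem selV_spec (ps : List (Int × (Int × Int))) (v' : Int) (n' : Int × Int)
    (h : selV ps = some (v', n')) :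
    PySem.List.min? (ps.map Prod.fst) (fun x => x) = some v' ∧
    ∃ k, PySem.List.index? (ps.map Prod.fst) v' = some k ∧ (ps.map Prod.snd)[k]? = some n' := by
  induction ps generalizing v' n' with
  | nil => simp [selV] at h
  | cons p ps ih =>
    cases hs : selV ps with
    | none =>
      simp only [selV, hs] at h
      obtain rfl : p = (v', n') := by simpa using h
      have : ps = [] := (selV_eq_none_iff ps).1 hs
      subst this
      refine ⟨by simp [PySem.List.min?_id_cons], 0, ?_, by simp⟩
      simp
    | some r =>
      obtain ⟨rv, rn⟩ := r
      obtain ⟨pv, pn⟩ := p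
      simp only [selV, hs] at h
      obtain ⟨h1, ⟨k, hk, hn⟩⟩ := ih rv rn (by rw [hs])
      obtain ⟨hh, tt, hps⟩ : ∃ hh tt, ps = hh :: tt := by
        cases ps with
        | nil => simp [selV] at hs
        | cons a b => exact ⟨a, b, rfl⟩
      have hmin : PySem.List.min? (pv :: ps.map Prod.fst) (fun x => x) = some (min pv rv) := by
        rw [hps] at h1 ⊢
        simp only [List.map_cons] at h1 ⊢
        rw [PySem.List.min?_id_cons] at h1 ⊢
        injection h1 with h1'
        simp only [List.foldl_cons, foldl_min_min, h1']
      by_cases hlt : rv < pv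
      · rw [if_pos hlt] at h
        injection h with h'
        injection h' with e1 e2
        subst e1; subst e2
        refine ⟨?_, k + 1, ?_, by simpa using hn⟩
        · rw [List.map_cons, hmin, min_eq_right (le_of_lt hlt)]
        · rw [List.map_cons]
          show PySem.List.index? (pv :: List.map Prod.fst ps) rv = some (k + 1)
          rw [PySem.List.index?_cons_of_ne (List.map Prod.fst ps) (by omega : pv ≠ rv), hk]
          rfl
      · rw [if_neg hlt] at h
        injection h with h'
        injection h' with e1 e2
        subst e1; subst e2
        refine ⟨?_, 0, ?_, by simp⟩
        · rw [List.map_cons, hmin, min_eq_left (by omega)]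
        · rw [List.map_cons]
          show PySem.List.index? (pv :: List.map Prod.fst ps) pv = some 0
          rw [PySem.List.index?_cons_self]

-- the candidate stream both loops filter out of `neighbors`
def cands (torus : List (List Int)) (trail : List (Int × Int)) (current : Int) (neighbors : List (Int × Int)) : List (Int × (Int × Int)) :=
  neighbors.filterMap (fun nb =>
    let nv := PySem.List.pyGetD (PySem.List.pyGetD torus nb.1 []) nb.2 0
    if !trail.contains nb && decide (nv > current) then some (nv, nb) else none)

theorem foldA_eq (torus : List (List Int)) (trail : List (Int × Int)) (current : Int)
    (neighbors : List (Int × Int)) (e : List Int) (n : List (Int × Int)) :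
    neighbors.foldl (stepA torus trail current) (e, n)
    = (e ++ (cands torus trail current neighbors).map Prod.fst,
       n ++ (cands torus trail current neighbors).map Prod.snd) := by
  induction neighbors generalizing e n with
  | nil => simp [cands]
  | cons nb rest ih =>
    rw [List.foldl_cons]
    by_cases hc : (!trail.contains nb && decide (PySem.List.pyGetD (PySem.List.pyGetD torus nb.1 []) nb.2 0 > current)) = true
    · have hc' : nb ∉ trail ∧ current < PySem.List.pyGetD (PySem.List.pyGetD torus nb.1 []) nb.2 0 := by
        simpa using hc
      have hstep : stepA torus trail current (e, n) nb
          = (e ++ [PySem.List.pyGetD (PySem.List.pyGetD torus nb.1 []) nb.2 0], n ++ [nb]) := by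
        simp [stepA, visited, hc'.1, hc'.2]
      have hcands : cands torus trail current (nb :: rest)
          = (PySem.List.pyGetD (PySem.List.pyGetD torus nb.1 []) nb.2 0, nb) :: cands torus trail current rest := by
        simp only [cands, List.filterMap_cons]
        rw [if_pos hc]
      rw [hstep, ih, hcands]
      simp
    · have hstep : stepA torus trail current (e, n) nb = (e, n) := by
        simp only [stepA, visited]
        split
        · rename_i h; exact absurd h hc
        · rfl
      have hcands : cands torus trail current (nb :: rest) = cands torus trail current rest := by
        simp only [cands, List.filterMap_cons]
        rw [if_neg hc]
      rw [hstep, ih, hcands]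

def stepMin (best : Option (Int × (Int × Int))) (p : Int × (Int × Int)) : Option (Int × (Int × Int)) :=
  match best with
  | none => some p
  | some q => if p.1 < q.1 then some p else best

theorem foldB_eq (torus : List (List Int)) (trail : List (Int × Int)) (current : Int)
    (neighbors : List (Int × Int)) (best : Option (Int × (Int × Int))) :
    neighbors.foldl (stepB torus trail current) best
    = (cands torus trail current neighbors).foldl stepMin best := by
  induction neighbors generalizing best with
  | nil => simp [cands]
  | cons nb rest ih =>
    rw [List.foldl_cons]
    by_cases hc : (!trail.contains nb && decide (PySem.List.pyGetD (PySem.List.pyGetD torus nb.1 []) nb.2 0 > current)) = true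
    · have hc' : nb ∉ trail ∧ current < PySem.List.pyGetD (PySem.List.pyGetD torus nb.1 []) nb.2 0 := by
        simpa using hc
      have hstep : stepB torus trail current best nb
          = stepMin best (PySem.List.pyGetD (PySem.List.pyGetD torus nb.1 []) nb.2 0, nb) := by
        cases best with
        | none => simp [stepB, stepMin, hc'.1, hc'.2]
        | some q =>
          by_cases hlt : PySem.List.pyGetD (PySem.List.pyGetD torus nb.1 []) nb.2 0 < q.1 <;>
            simp [stepB, stepMin, hc'.1, hc'.2, hlt]
      have hcands : cands torus trail current (nb :: rest)
          = (PySem.List.pyGetD (PySem.List.pyGetD torus nb.1 []) nb.2 0, nb) :: cands torus trail current rest := by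
        simp only [cands, List.filterMap_cons]
        rw [if_pos hc]
      rw [hstep, ih, hcands, List.foldl_cons]
    · have hstep : stepB torus trail current best nb = best := by
        cases hb : (!trail.contains nb && decide (PySem.List.pyGetD (PySem.List.pyGetD torus nb.1 []) nb.2 0 > current)) with
        | true => exact absurd hb hc
        | false =>
          have hb' : ¬(nb ∉ trail ∧ current < PySem.List.pyGetD (PySem.List.pyGetD torus nb.1 []) nb.2 0) := by
            intro h
            exact hc (by simp [h.1, h.2])
          cases best with
          | none =>
            simp only [stepB]
            simp only [Bool.and_eq_true, Bool.not_eq_true', decide_eq_true_eq]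
            rw [if_neg (by intro h; exact hb' (by
              rcases h with ⟨⟨ha, hbv⟩, _⟩
              exact ⟨by simpa using ha, hbv⟩))]
          | some q =>
            simp only [stepB]
            simp only [Bool.and_eq_true, Bool.not_eq_true', decide_eq_true_eq]
            rw [if_neg (by intro h; exact hb' (by
              rcases h with ⟨⟨ha, hbv⟩, _⟩
              exact ⟨by simpa using ha, hbv⟩))]
      have hcands : cands torus trail current (nb :: rest) = cands torus trail current rest := by
        simp only [cands, List.filterMap_cons]
        rw [if_neg hc]
      rw [hstep, ih, hcands]

def cmb (q : Int × (Int × Int)) (r : Option (Int × (Int × Int))) : Option (Int × (Int × Int)) :=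
  match r with
  | none => some q
  | some r => if r.1 < q.1 then some r else some q

theorem foldl_stepMin_some (ps : List (Int × (Int × Int))) (q : Int × (Int × Int)) :
    ps.foldl stepMin (some q) = cmb q (selV ps) := by
  induction ps generalizing q with
  | nil => rfl
  | cons p ps ih =>
    have hsel : selV (p :: ps) = cmb p (selV ps) := rfl
    rw [List.foldl_cons, hsel]
    have hstep : stepMin (some q) p = some (if p.1 < q.1 then p else q) := by
      simp only [stepMin]
      split_ifs <;> rfl
    rw [hstep, ih]
    cases hs : selV ps with
    | none =>
      simp only [cmb]
      split_ifs <;> rfl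
    | some r =>
      simp only [cmb]
      by_cases h1 : p.1 < q.1 <;> by_cases h2 : r.1 < p.1 <;> by_cases h3 : r.1 < q.1 <;>
        simp [h1, h2, h3] <;> omega

theorem foldl_stepMin_none (ps : List (Int × (Int × Int))) :
    ps.foldl stepMin none = selV ps := by
  cases ps with
  | nil => rfl
  | cons p ps =>
    simp only [List.foldl_cons]
    show ps.foldl stepMin (some p) = _
    rw [foldl_stepMin_some]
    simp [selV, cmb]

-- ===== VERDICT (by name: the statement is the Claim_ definition above) =====
theorem next_neighbor_spec : Claim_equal_next_neighbor := by
  intro torus trail neighbors current _ _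
  unfold Spec_next_neighbor next_neighbor next_neighbor_alt
  rw [foldA_eq, foldB_eq, foldl_stepMin_none]
  simp only [List.nil_append]
  set ps := cands torus trail current neighbors with hps
  cases hs : selV ps with
  | none =>
    have : ps = [] := (selV_eq_none_iff ps).1 hs
    rw [this]
    simp
  | some r =>
    obtain ⟨h1, k, hk, hn⟩ := selV_spec ps r.1 r.2 (by rw [hs])
    have hpsne : ps ≠ [] := by
      intro h
      rw [(selV_eq_none_iff ps).2 h] at hs
      cases hs
    have hne : ps.map Prod.fst ≠ [] := by simpa using hpsne
    rw [if_neg hne]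
    simp only [h1, hk, Option.getD_some, Option.map_some]
    rw [PySem.List.pyGetD_natCast]
    have : (ps.map Prod.snd).getD k (0, 0) = r.2 := by
      have := hn
      rw [List.getElem?_eq_some_iff] at this
      obtain ⟨hlt, hval⟩ := this
      simp [List.getD, List.getElem?_eq_getElem hlt, hval]
    rw [this]
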